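-- pv_equiv track=rewrite | github.com/gauravrmazra/gauravbytes | algorithms/src/main/java/cc/gaurav/queue/ TowersWithoutValley.py | increasing_prefix_sums
-- ===== SOURCE A (Python) =====
-- def increasing_prefix_sums(nums):
--     # Store the current best increasing sequence, in the form (value, number of occurrences)
--     stack = []
--     current_sum = 0  # always equal to sum(x * c for x in stack)
--
--     ans = []
--
--     for x in nums:
--         count = 1
--
--         # We need to include `x` in our sequence. Values to the left may need to be reduced.
--         while stack and stack[-1][0] > x:
--             # Anything greater than `x` gets clamped down to `x`.
--             # Since `stack` is increasing we only need to look at its tail.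
--             # This is similar to the min-queue algorithm.
--             current_sum -= stack[-1][0] * stack[-1][1]
--             count += stack[-1][1]
--             stack.pop()
--
--         stack.append((x, count))
--         current_sum += x * count
--         ans.append(current_sum)
--
--     return ans
-- ===== SOURCE B (Python) =====
-- def increasing_prefix_sums(nums):
--     # ans[i] = sum over j<=i of min(nums[j..i]): recompute each prefix's
--     # suffix-minima sum by a backward rescan with a running minimum.
--     ans = []
--     prefix = []
--     for x in nums:
--         prefix.append(x)
--         m = x
--         total = 0
--         for v in reversed(prefix):
--             m = min(m, v)
--             total += m
--         ans.append(total)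
--     return ans
-- ===== Notes on version B (the rewrite author's own statement) =====
-- stated objective: simpler
-- what changed: Replaces the monotonic stack with lazily-maintained clamped sum by a plain nested rescan that recomputes, for each ending index, the sum of suffix minima with a backward running minimum.
import Mathlib
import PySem

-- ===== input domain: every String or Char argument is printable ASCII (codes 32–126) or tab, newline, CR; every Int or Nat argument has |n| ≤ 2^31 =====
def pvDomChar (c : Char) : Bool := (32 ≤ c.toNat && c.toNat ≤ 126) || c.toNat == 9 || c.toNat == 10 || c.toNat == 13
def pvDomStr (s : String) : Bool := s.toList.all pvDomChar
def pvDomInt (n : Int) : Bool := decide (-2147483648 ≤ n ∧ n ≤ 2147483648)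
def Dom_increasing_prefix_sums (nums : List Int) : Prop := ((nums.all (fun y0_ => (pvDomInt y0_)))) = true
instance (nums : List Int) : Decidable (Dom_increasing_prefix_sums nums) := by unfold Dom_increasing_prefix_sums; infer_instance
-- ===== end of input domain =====

-- B replaces A's monotonic stack with lazily maintained clamped sum by a plain
-- nested backward rescan of each prefix (simpler; not faster: O(n^2) vs O(n)).

-- ===== PORT A =====
-- the `while stack and stack[-1][0] > x` loop; the stack is stored top-first
def pvPop (x : Int) : List (Int × Int) → Int → Int → List (Int × Int) × Int × Int
  | [], s, c => ([], s, c)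
  | (v, n) :: st, s, c =>
      if v > x then pvPop x st (s - v * n) (c + n)
      else ((v, n) :: st, s, c)

-- one iteration of A's `for x in nums` loop over the state (stack, current_sum, ans)
def pvStepA (acc : List (Int × Int) × Int × List Int) (x : Int) :
    List (Int × Int) × Int × List Int :=
  let (st, s, ans) := acc
  let (st', s', count) := pvPop x st s 1
  ((x, count) :: st', s' + x * count, ans ++ [s' + x * count])

def increasing_prefix_sums (nums : List Int) : List Int :=
  (nums.foldl pvStepA ([], 0, [])).2.2

-- ===== PORT B =====
-- B's inner loop: walk the current prefix backwards keeping a running minimum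
def pvSufMinSum (p : List Int) (x : Int) : Int :=
  (p.reverse.foldl (fun (mt : Int × Int) v =>
    let m := min mt.1 v
    (m, mt.2 + m)) (x, 0)).2

def increasing_prefix_sums_alt (nums : List Int) : List Int :=
  (nums.foldl (fun (acc : List Int × List Int) x =>
    let p := acc.1 ++ [x]
    (p, acc.2 ++ [pvSufMinSum p x])) ([], [])).2

-- ===== PRECONDITION & SPEC =====
def Spec_increasing_prefix_sums (nums : List Int) (out : List Int) : Prop := out = increasing_prefix_sums_alt nums
instance (nums : List Int) (out : List Int) : Decidable (Spec_increasing_prefix_sums nums out) := by unfold Spec_increasing_prefix_sums; infer_instance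

-- ===== CLAIM (what is proved, stated in full; the proofs are below) =====
def Claim_equal_increasing_prefix_sums : Prop := ∀ (nums : List Int), Dom_increasing_prefix_sums nums → Spec_increasing_prefix_sums nums (increasing_prefix_sums nums)

-- ===== LEMMAS AND PROOFS =====

-- running minima of a list (head first): pvRM r = [min r[0..0], min r[0..1], …]
def pvRM : List Int → List Int
  | [] => []
  | y :: r => y :: (pvRM r).map (fun v => min y v)

-- the multiset of values a (value, count) stack denotes, top first
def pvExpand : List (Int × Int) → List Int
  | [] => []
  | (v, n) :: st => List.replicate n.toNat v ++ pvExpand st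

-- the common specification of both answer lists: for each prefix, the sum of
-- the running minima of its reverse (= the sum of its suffix minima)
def pvSpec : List Int → List Int → List Int
  | _, [] => []
  | p, x :: rest => (pvRM ((p ++ [x]).reverse)).sum :: pvSpec (p ++ [x]) rest

theorem pvTakeWhile_append (p : Int → Bool) (l1 l2 : List Int) (h : ∀ a ∈ l1, p a) :
    (l1 ++ l2).takeWhile p = l1 ++ l2.takeWhile p := by
  induction l1 with
  | nil => simp
  | cons a l ih => simp_all

theorem pvDropWhile_append (p : Int → Bool) (l1 l2 : List Int) (h : ∀ a ∈ l1, p a) :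
    (l1 ++ l2).dropWhile p = l2.dropWhile p := by
  induction l1 with
  | nil => simp
  | cons a l ih => simp_all

theorem pvRM_map_min (m : Int) (r : List Int) :
    (r.foldl (fun (mt : Int × Int) v => let m' := min mt.1 v; (m', mt.2 + m')) (m, 0)).2
      = ((pvRM r).map (fun v => min m v)).sum := by
  suffices h : ∀ (r : List Int) (m t : Int),
      (r.foldl (fun (mt : Int × Int) v => let m' := min mt.1 v; (m', mt.2 + m')) (m, t)).2
        = t + ((pvRM r).map (fun v => min m v)).sum by
    simpa using h r m 0
  intro r
  induction r with
  | nil => intro m t; simp [pvRM]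
  | cons y r ih =>
    intro m t
    simp only [List.foldl_cons, pvRM, List.map_cons, List.map_map, List.sum_cons]
    rw [ih]
    have : ((pvRM r).map ((fun v => min m v) ∘ fun v => min y v))
        = (pvRM r).map (fun v => min (min m y) v) := by
      apply List.map_congr_left; intro a _; simp [Function.comp, min_assoc]
    rw [this]; ring

theorem pvSufMinSum_spec (p : List Int) (x : Int) :
    pvSufMinSum (p ++ [x]) x = (pvRM ((p ++ [x]).reverse)).sum := by
  unfold pvSufMinSum
  rw [pvRM_map_min]
  have h : (p ++ [x]).reverse = x :: p.reverse := by simp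
  rw [h]
  simp only [pvRM, List.map_cons, List.map_map, List.sum_cons, min_self]
  congr 2
  apply List.map_congr_left; intro a _
  simp [Function.comp]

theorem pvAltFold (nums : List Int) : ∀ (p : List Int) (ans : List Int),
    nums.foldl (fun (acc : List Int × List Int) x =>
      let q := acc.1 ++ [x]
      (q, acc.2 ++ [pvSufMinSum q x])) (p, ans) = (p ++ nums, ans ++ pvSpec p nums) := by
  induction nums with
  | nil => intro p ans; simp [pvSpec]
  | cons x rest ih =>
    intro p ans
    simp only [List.foldl_cons, pvSpec]
    rw [ih, pvSufMinSum_spec]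
    simp

theorem pvPop_spec (x : Int) (st : List (Int × Int)) : ∀ (s c : Int),
    (∀ q ∈ st, 1 ≤ q.2) →
    (pvExpand st).Pairwise (fun a b => b ≤ a) →
    ∃ st', pvPop x st s c =
        (st', s - ((pvExpand st).takeWhile (fun v => decide (x < v))).sum,
          c + ((pvExpand st).takeWhile (fun v => decide (x < v))).length) ∧
      pvExpand st' = (pvExpand st).dropWhile (fun v => decide (x < v)) ∧
      (∀ q ∈ st', 1 ≤ q.2) ∧ (∀ v ∈ pvExpand st', v ≤ x) := by
  induction st with
  | nil =>
    intro s c _ _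
    exact ⟨[], by simp [pvPop, pvExpand]⟩
  | cons q st ih =>
    obtain ⟨v, n⟩ := q
    intro s c hc hp
    have hn : 1 ≤ n := hc (v, n) (List.mem_cons_self)
    have hnat : (n.toNat : Int) = n := Int.toNat_of_nonneg (by omega)
    have hex : pvExpand ((v, n) :: st) = List.replicate n.toNat v ++ pvExpand st := rfl
    by_cases hvx : v > x
    · have hall : ∀ a ∈ List.replicate n.toNat v, (fun u => decide (x < u)) a = true := by
        intro a ha; simp [List.eq_of_mem_replicate ha, hvx]
      have hpop : pvPop x ((v, n) :: st) s c = pvPop x st (s - v * n) (c + n) := by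
        simp [pvPop, hvx]
      obtain ⟨st', h1, h2, h3, h4⟩ := ih (s - v * n) (c + n)
        (fun q hq => hc q (List.mem_cons_of_mem _ hq))
        ((List.pairwise_append.mp (hex ▸ hp)).2.1)
      refine ⟨st', ?_, ?_, h3, h4⟩
      · rw [hpop, h1, hex, pvTakeWhile_append _ _ _ hall]
        have hrs : (List.replicate n.toNat v).sum = (n.toNat : Int) * v := by
          simp [List.sum_replicate]
        simp only [List.sum_append, List.length_append, Prod.mk.injEq, hrs, hnat,
          List.length_replicate]
        refine ⟨trivial, by ring, by omega⟩
      · rw [hex, pvDropWhile_append _ _ _ hall, h2]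
    · have hpop : pvPop x ((v, n) :: st) s c = ((v, n) :: st, s, c) := by
        simp [pvPop, hvx]
      obtain ⟨k, hk⟩ : ∃ k, n.toNat = k + 1 := ⟨n.toNat - 1, by omega⟩
      have hcons : pvExpand ((v, n) :: st) = v :: (List.replicate k v ++ pvExpand st) := by
        rw [hex, hk, List.replicate_succ]; rfl
      have hxv : (decide (x < v)) = false := by simp; omega
      have htake : (pvExpand ((v, n) :: st)).takeWhile (fun u => decide (x < u)) = [] := by
        rw [hcons]; simp [hxv]
      have hdrop : (pvExpand ((v, n) :: st)).dropWhile (fun u => decide (x < u))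
          = pvExpand ((v, n) :: st) := by
        rw [hcons]; simp [hxv]
      refine ⟨(v, n) :: st, ?_, by rw [hdrop], hc, ?_⟩
      · rw [hpop, htake]; simp
      · intro u hu
        rw [hcons] at hu hp
        rcases List.mem_cons.mp hu with h | h
        · omega
        · have := (List.pairwise_cons.mp hp).1 u h
          omega

theorem pvAFold (nums : List Int) : ∀ (st : List (Int × Int)) (s : Int) (ans p : List Int),
    (∀ q ∈ st, 1 ≤ q.2) →
    (pvExpand st).Pairwise (fun a b => b ≤ a) →
    pvExpand st = pvRM p.reverse →
    s = (pvRM p.reverse).sum →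
    (nums.foldl pvStepA (st, s, ans)).2.2 = ans ++ pvSpec p nums := by
  induction nums with
  | nil => intros; simp [pvSpec]
  | cons x rest ih =>
    intro st s ans p hc hp he hs
    obtain ⟨st', h1, h2, h3, h4⟩ := pvPop_spec x st s 1 hc hp
    set T := (pvExpand st).takeWhile (fun v => decide (x < v)) with hT
    set D := (pvExpand st).dropWhile (fun v => decide (x < v)) with hD
    set c2 : Int := 1 + (T.length : Int) with hc2
    set s2 : Int := (s - T.sum) + x * c2 with hs2
    have hstep : pvStepA (st, s, ans) x = ((x, c2) :: st', s2, ans ++ [s2]) := by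
      simp [pvStepA, h1, hc2, hs2]
    have hTD : T ++ D = pvExpand st := List.takeWhile_append_dropWhile
    have hmapT : T.map (fun v => min x v) = List.replicate T.length x := by
      have hmem : ∀ b ∈ T.map (fun v => min x v), b = x := by
        intro b hb
        obtain ⟨v, hv, rfl⟩ := List.mem_map.mp hb
        have := List.mem_takeWhile_imp hv
        simp at this
        omega
      simpa using List.eq_replicate_of_mem hmem
    have hmapD : D.map (fun v => min x v) = D := by
      apply List.map_congr_left ?_ |>.trans (List.map_id _)
      intro a ha
      have : a ≤ x := h4 a (h2 ▸ ha)
      simp [min_eq_right this]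
    have hc2nat : c2.toNat = 1 + T.length := by omega
    have hE2 : pvExpand ((x, c2) :: st') = x :: (pvExpand st).map (fun v => min x v) := by
      show List.replicate c2.toNat x ++ pvExpand st' = _
      rw [hc2nat, h2, ← hTD, Nat.add_comm]
      simp [List.replicate_succ, List.map_append, hmapT, hmapD]
    have hrm : pvRM ((p ++ [x]).reverse) = x :: (pvRM p.reverse).map (fun v => min x v) := by
      simp [pvRM]
    have hsum : s2 = (pvRM ((p ++ [x]).reverse)).sum := by
      have hsplit : s = T.sum + D.sum := by rw [hs, ← he, ← hTD, List.sum_append]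
      rw [hrm, ← he, ← hTD]
      simp only [List.map_append, hmapT, hmapD, List.sum_cons, List.sum_append,
        List.sum_replicate, nsmul_eq_mul, hs2, hsplit, hc2]
      ring
    have hp2 : (pvExpand ((x, c2) :: st')).Pairwise (fun a b => b ≤ a) := by
      rw [hE2]
      refine List.pairwise_cons.mpr ⟨?_, ?_⟩
      · intro u hu
        obtain ⟨v, _, rfl⟩ := List.mem_map.mp hu
        exact min_le_left _ _
      · exact hp.map _ (fun a b h => min_le_min (le_refl x) h)
    have hc' : ∀ q ∈ (x, c2) :: st', 1 ≤ q.2 := by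
      intro q hq
      rcases List.mem_cons.mp hq with rfl | hq
      · simp [hc2]
      · exact h3 q hq
    rw [List.foldl_cons, hstep, ih _ _ _ (p ++ [x]) hc' hp2 (hE2.trans (he ▸ hrm.symm)) hsum]
    simp [pvSpec, hsum]

-- ===== VERDICT (by name: the statement is the Claim_ definition above) =====
theorem increasing_prefix_sums_spec : Claim_equal_increasing_prefix_sums := by
  intro nums _
  unfold Spec_increasing_prefix_sums increasing_prefix_sums increasing_prefix_sums_alt
  rw [pvAltFold, pvAFold nums [] 0 [] []] <;> simp [pvExpand, pvRM]
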